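-- pv_equiv track=rewrite | github.com/TiagoFraga/green_keyboards | src/keyboard_functions.py | text_to_chars
-- ===== SOURCE A (Python) =====
-- def text_to_lines(text):
--    lines = []
--    lines = text.split('\n')
--    return lines
--
-- def text_to_words(text):
--    words = []
--    lines = text_to_lines(text)
--    for line in lines:
--         arr = line.split(' ')
--         for w in arr:
--             words.append(w)
--             words.append(' ')
--         words.append('\n')
--    return words
--
-- def text_to_chars(text):
--    chars = []
--    words = text_to_words(text)
--    for word in words:
--         if word == ' ':
--             chars.append(' ')
--         elif word == '\n':
--             chars.append('\n')
--         else: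
--             for c in word:
--                 chars.append(c)
--    return chars
-- ===== SOURCE B (Python) =====
-- def text_to_chars(text):
--     chars = []
--     for line in text.split('\n'):
--         chars.extend(line)
--         chars.append(' ')
--         chars.append('\n')
--     return chars
-- ===== Notes on version B (the rewrite author's own statement) =====
-- stated objective: simpler
-- what changed: B drops the word-split/marker/classification pipeline: it splits only on newlines and, per line, emits the line's characters followed by the space marker and the newline marker directly (one pass, no space-tokenization, no if/elif classification).
import Mathlib
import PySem

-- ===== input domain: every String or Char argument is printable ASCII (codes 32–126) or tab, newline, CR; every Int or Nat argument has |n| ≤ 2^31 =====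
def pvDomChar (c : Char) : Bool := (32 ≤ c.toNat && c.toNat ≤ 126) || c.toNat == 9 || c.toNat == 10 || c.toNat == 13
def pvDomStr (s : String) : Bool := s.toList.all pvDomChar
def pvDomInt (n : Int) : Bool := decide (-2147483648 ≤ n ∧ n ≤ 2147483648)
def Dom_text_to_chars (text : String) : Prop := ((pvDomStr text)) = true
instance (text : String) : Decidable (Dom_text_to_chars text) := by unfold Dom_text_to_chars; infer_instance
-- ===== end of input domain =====

-- B replaces A's split-into-words / marker / per-word classification pipeline by a single
-- pass over the newline-split lines, emitting each line's characters plus the ' ' and '\n'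
-- markers directly (objective: simpler).


-- ===== PORT A =====
-- text.split('\n') / line.split(' '): the separators are literal nonempty strings, so
-- PySem.Chars.splitOn (the sep ≠ "" form of str.split) is exact here.
def text_to_lines (text : String) : List String :=
  (PySem.Chars.splitOn text.toList ['\n']).map String.ofList

def text_to_words (text : String) : List String :=
  (text_to_lines text).foldl
    (fun words line =>
      ((PySem.Chars.splitOn line.toList [' ']).map String.ofList).foldl
        (fun ws w => ws ++ [w] ++ [" "]) words
      ++ ["\n"])
    []

def text_to_chars (text : String) : List String :=
  (text_to_words text).foldl
    (fun chars word =>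
      if word == " " then chars ++ [" "]
      else if word == "\n" then chars ++ ["\n"]
      else chars ++ word.toList.map (fun c => String.ofList [c]))
    []

-- ===== PORT B =====
def text_to_chars_alt (text : String) : List String :=
  ((PySem.Chars.splitOn text.toList ['\n']).map String.ofList).foldl
    (fun chars line => chars ++ line.toList.map (fun c => String.ofList [c]) ++ [" ", "\n"])
    []

-- ===== PRECONDITION & SPEC =====
def Spec_text_to_chars (text : String) (out : List String) : Prop := out = text_to_chars_alt text
instance (text : String) (out : List String) : Decidable (Spec_text_to_chars text out) := by unfold Spec_text_to_chars; infer_instance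

-- ===== CLAIM (what is proved, stated in full; the proofs are below) =====
def Claim_equal_text_to_chars : Prop := ∀ (text : String), Dom_text_to_chars text → Spec_text_to_chars text (text_to_chars text)

-- ===== LEMMAS AND PROOFS =====

-- a plain recursive description of splitting on a single-character separator
def mySplit (c : Char) : List Char → List Char → List (List Char)
  | [], cur => [cur.reverse]
  | x :: rest, cur => if x = c then cur.reverse :: mySplit c rest [] else mySplit c rest (x :: cur)

theorem go_single (c : Char) : ∀ (l : List Char) (fuel : Nat), l.length < fuel →
    ∀ (cur : List Char) (acc : List (List Char)),
    PySem.Chars.splitOn.go [c] fuel l cur acc = acc.reverse ++ mySplit c l cur := by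
  intro l
  induction l with
  | nil =>
    intro fuel h cur acc
    match fuel, h with
    | fuel+1, _ =>
      simp [PySem.Chars.splitOn.go, mySplit]
  | cons x rest ih =>
    intro fuel h cur acc
    match fuel, h with
    | fuel+1, h =>
      have hrest : rest.length < fuel := by simpa using Nat.lt_of_succ_lt_succ h
      simp only [PySem.Chars.splitOn.go]
      by_cases hx : x = c
      · subst hx
        simp [List.isPrefixOf, ih fuel hrest, mySplit]
      · simp [List.isPrefixOf, Ne.symm hx, ih fuel hrest, mySplit, hx]

theorem splitOn_single (c : Char) (l : List Char) :
    PySem.Chars.splitOn l [c] = mySplit c l [] := by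
  simp [PySem.Chars.splitOn, go_single c l (l.length + 1) (Nat.lt_succ_self _)]

theorem mem_mySplit_not (c : Char) : ∀ (l cur : List Char) (w : List Char),
    w ∈ mySplit c l cur → c ∉ cur → c ∉ w := by
  intro l
  induction l with
  | nil =>
    intro cur w hw hc
    simp [mySplit] at hw
    subst hw; simpa using hc
  | cons x rest ih =>
    intro cur w hw hc
    by_cases hx : x = c
    · subst hx
      simp [mySplit] at hw
      rcases hw with hw | hw
      · subst hw; simpa using hc
      · exact ih [] w hw (by simp)
    · simp [mySplit, hx] at hw
      exact ih (x :: cur) w hw (by simp [hc]; exact fun h => hx (Eq.symm h))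

theorem mem_mySplit_sub (c : Char) : ∀ (l cur : List Char) (w : List Char) (d : Char),
    w ∈ mySplit c l cur → d ∈ w → d ∈ l ∨ d ∈ cur := by
  intro l
  induction l with
  | nil =>
    intro cur w d hw hd
    simp [mySplit] at hw
    subst hw; right; simpa using hd
  | cons x rest ih =>
    intro cur w d hw hd
    by_cases hx : x = c
    · subst hx
      simp [mySplit] at hw
      rcases hw with hw | hw
      · subst hw; right; simpa using hd
      · rcases ih [] w d hw hd with h | h
        · left; simp [h]
        · simp at h
    · simp [mySplit, hx] at hw
      rcases ih (x :: cur) w d hw hd with h | h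
      · left; simp [h]
      · simp at h
        rcases h with h | h
        · left; simp [h]
        · right; exact h

theorem mySplit_flat (c : Char) (g : Char → String) : ∀ (l cur : List Char),
    (mySplit c l cur).flatMap (fun w => w.map g ++ [g c])
      = (cur.reverse ++ l).map g ++ [g c] := by
  intro l
  induction l with
  | nil => intro cur; simp [mySplit]
  | cons x rest ih =>
    intro cur
    by_cases hx : x = c
    · subst hx
      simp [mySplit, ih]
    · simp [mySplit, hx, ih (x :: cur)]

def expandW (word : String) : List String :=
  if word == " " then [" "]
  else if word == "\n" then ["\n"]
  else word.toList.map (fun c => String.ofList [c])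

theorem line_chars (line : List Char) (h : '\n' ∉ line) :
    (((PySem.Chars.splitOn line [' ']).map String.ofList).flatMap (fun w => [w, " "])).flatMap expandW
      = line.map (fun c => String.ofList [c]) ++ [" "] := by
  rw [splitOn_single]
  rw [List.flatMap_map]
  rw [List.flatMap_assoc]
  have step : ∀ p ∈ mySplit ' ' line [],
      (([String.ofList p, " "] : List String).flatMap expandW)
        = p.map (fun c => String.ofList [c]) ++ [String.ofList [' ']] := by
    intro p hp
    have hsp : ' ' ∉ p := mem_mySplit_not ' ' line [] p hp (by simp)
    have hnl : '\n' ∉ p := by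
      intro hd
      rcases mem_mySplit_sub ' ' line [] p '\n' hp hd with h' | h'
      · exact h h'
      · simp at h'
    have h1 : (String.ofList p == " ") = false := by
      rw [beq_eq_false_iff_ne]
      intro he
      have : p = [' '] := String.ofList_inj.mp (by rw [he])
      subst this; simp at hsp
    have h2 : (String.ofList p == "\n") = false := by
      rw [beq_eq_false_iff_ne]
      intro he
      have : p = ['\n'] := String.ofList_inj.mp (by rw [he])
      subst this; simp at hnl
    simp [expandW, h1, h2, String.toList_ofList]
  rw [List.flatMap_congr step]
  exact mySplit_flat ' ' (fun c => String.ofList [c]) line []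




theorem words_eq (text : String) :
    text_to_words text
      = (PySem.Chars.splitOn text.toList ['\n']).flatMap
          (fun p => ((PySem.Chars.splitOn p [' ']).map String.ofList).flatMap
            (fun w => [w, " "]) ++ ["\n"]) := by
  unfold text_to_words text_to_lines
  have hb : (fun (ws : List String) (w : String) => ws ++ [w] ++ [" "])
      = (fun ws w => ws ++ [w, " "]) := by
    funext ws w; simp
  have hinner : ∀ (line : String) (ws : List String),
      ((PySem.Chars.splitOn line.toList [' ']).map String.ofList).foldl
        (fun ws w => ws ++ [w] ++ [" "]) ws
        = ws ++ ((PySem.Chars.splitOn line.toList [' ']).map String.ofList).flatMap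
            (fun w => [w, " "]) := by
    intro line ws
    rw [hb, PySem.List.foldl_append_eq_flatMap]
  have hbody : (fun (words : List String) (line : String) =>
      ((PySem.Chars.splitOn line.toList [' ']).map String.ofList).foldl
        (fun ws w => ws ++ [w] ++ [" "]) words ++ ["\n"])
      = (fun words line => words ++
          (((PySem.Chars.splitOn line.toList [' ']).map String.ofList).flatMap
            (fun w => [w, " "]) ++ ["\n"])) := by
    funext words line
    rw [hinner]; simp
  rw [hbody, PySem.List.foldl_append_eq_flatMap]
  rw [List.flatMap_map]
  simp [String.toList_ofList]

theorem main_eq (text : String) : text_to_chars text = text_to_chars_alt text := by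
  unfold text_to_chars text_to_chars_alt
  have hbody : (fun (chars : List String) (word : String) =>
      if word == " " then chars ++ [" "]
      else if word == "\n" then chars ++ ["\n"]
      else chars ++ word.toList.map (fun c => String.ofList [c]))
      = (fun chars word => chars ++ expandW word) := by
    funext chars word
    unfold expandW
    split
    · rfl
    · split <;> rfl
  rw [hbody, PySem.List.foldl_append_eq_flatMap, words_eq]
  have hbody' : (fun (chars : List String) (line : String) =>
      chars ++ line.toList.map (fun c => String.ofList [c]) ++ [" ", "\n"])
      = (fun chars line => chars ++ (line.toList.map (fun c => String.ofList [c]) ++ [" ", "\n"])) := by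
    funext chars line; simp
  rw [hbody', PySem.List.foldl_append_eq_flatMap]
  rw [List.flatMap_map, List.flatMap_assoc]
  simp only [List.nil_append]
  apply List.flatMap_congr
  intro p hp
  have hnl : '\n' ∉ p := by
    rw [splitOn_single] at hp
    exact mem_mySplit_not '\n' text.toList [] p hp (by simp)
  rw [List.flatMap_append, line_chars p hnl]
  simp [expandW, String.toList_ofList]

-- ===== VERDICT (by name: the statement is the Claim_ definition above) =====
theorem text_to_chars_spec : Claim_equal_text_to_chars := by
  intro text _
  unfold Spec_text_to_chars
  exact main_eq text
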